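-- pv_equiv track=rewrite | github.com/mutlumehmet/stock-image-metadata-generator | main.py | fill_keywords_to_max
-- ===== SOURCE A (Python) =====
-- def fill_keywords_to_max(existing, max_count, candidates):
--     """Append from candidates (no duplicates, case-insensitive) until length reaches max_count."""
--     seen = {k.strip().lower() for k in existing if k and k.strip()}
--     out = list(existing)
--     for k in candidates:
--         if len(out) >= max_count:
--             break
--         t = (k or "").strip()
--         if not t or t.lower() in seen:
--             continue
--         seen.add(t.lower())
--         out.append(t)
--     return out
-- ===== SOURCE B (Python) =====
-- def fill_keywords_to_max(existing, max_count, candidates):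
--     """Append from candidates (no duplicates, case-insensitive) until length reaches max_count."""
--     seen = {k.strip().lower() for k in existing if k.strip()}
--     accepted = []
--     for k in candidates:
--         t = (k or "").strip()
--         low = t.lower()
--         if t and low not in seen:
--             seen.add(low)
--             accepted.append(t)
--     out = list(existing)
--     needed = max_count - len(out)
--     if needed > 0:
--         out.extend(accepted[:needed])
--     return out
-- ===== Notes on version B (the rewrite author's own statement) =====
-- stated objective: alternative
-- what changed: B replaces A's single length-guarded append loop by a two-phase decomposition: one unguarded pass filtering candidates into an ordered dedup list, then a single extend of the first max(0, max_count - len(existing)) accepted items.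
import Mathlib
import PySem

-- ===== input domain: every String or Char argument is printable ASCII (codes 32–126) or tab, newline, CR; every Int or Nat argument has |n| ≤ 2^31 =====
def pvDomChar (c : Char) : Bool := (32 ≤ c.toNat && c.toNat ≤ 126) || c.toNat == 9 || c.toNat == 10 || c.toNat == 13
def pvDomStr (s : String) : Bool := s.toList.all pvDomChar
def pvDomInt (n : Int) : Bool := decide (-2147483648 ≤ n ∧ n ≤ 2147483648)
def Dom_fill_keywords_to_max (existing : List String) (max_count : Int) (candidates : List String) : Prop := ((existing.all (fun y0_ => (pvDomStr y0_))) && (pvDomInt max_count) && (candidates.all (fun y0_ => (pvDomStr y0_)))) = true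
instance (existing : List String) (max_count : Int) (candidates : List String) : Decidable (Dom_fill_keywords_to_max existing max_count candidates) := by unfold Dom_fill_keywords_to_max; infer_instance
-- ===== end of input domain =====

-- B restructures A's length-guarded append loop into a two-phase filter-then-extend
-- decomposition (same cost, 'alternative' objective); return values proved equal on all inputs.

-- ===== PORT A =====
-- seed set: {k.strip().lower() for k in existing if k and k.strip()}
def fkA_seen (existing : List String) : PySem.Set String :=
  existing.foldl
    (fun s k =>
      if k ≠ "" ∧ PySem.Str.strip k ≠ "" then
        PySem.Set.add s (PySem.Str.lower (PySem.Str.strip k))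
      else s)
    PySem.Set.empty

-- the for-loop with its break/continue; t := (k or "").strip() = k.strip() since "".strip() = ""
def fkA_loop (max_count : Int) (seen : PySem.Set String) (out : List String) : List String → List String
  | [] => out
  | k :: rest =>
    if max_count ≤ (out.length : Int) then out
    else
      let t := PySem.Str.strip k
      if t = "" ∨ PySem.Set.contains seen (PySem.Str.lower t) then
        fkA_loop max_count seen out rest
      else
        fkA_loop max_count (PySem.Set.add seen (PySem.Str.lower t)) (out ++ [t]) rest

def fill_keywords_to_max (existing : List String) (max_count : Int) (candidates : List String) : List String :=
  fkA_loop max_count (fkA_seen existing) existing candidates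

-- ===== PORT B =====
-- seed set: {k.strip().lower() for k in existing if k.strip()}
def fkB_seen (existing : List String) : PySem.Set String :=
  existing.foldl
    (fun s k =>
      if PySem.Str.strip k ≠ "" then
        PySem.Set.add s (PySem.Str.lower (PySem.Str.strip k))
      else s)
    PySem.Set.empty

-- unguarded filtering pass: ordered list of accepted (stripped) candidates
def fkB_filter (seen : PySem.Set String) : List String → List String
  | [] => []
  | k :: rest =>
    let t := PySem.Str.strip k
    let low := PySem.Str.lower t
    if t ≠ "" ∧ ¬ PySem.Set.contains seen low then
      t :: fkB_filter (PySem.Set.add seen low) rest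
    else
      fkB_filter seen rest

def fill_keywords_to_max_alt (existing : List String) (max_count : Int) (candidates : List String) : List String :=
  let accepted := fkB_filter (fkB_seen existing) candidates
  let needed := max_count - (existing.length : Int)
  if 0 < needed then existing ++ accepted.take needed.toNat else existing

-- ===== PRECONDITION & SPEC =====
def Spec_fill_keywords_to_max (existing : List String) (max_count : Int) (candidates : List String) (out : List String) : Prop := out = fill_keywords_to_max_alt existing max_count candidates
instance (existing : List String) (max_count : Int) (candidates : List String) (out : List String) : Decidable (Spec_fill_keywords_to_max existing max_count candidates out) := by unfold Spec_fill_keywords_to_max; infer_instance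

-- ===== CLAIM (what is proved, stated in full; the proofs are below) =====
def Claim_equal_fill_keywords_to_max : Prop := ∀ (existing : List String) (max_count : Int) (candidates : List String), Dom_fill_keywords_to_max existing max_count candidates → Spec_fill_keywords_to_max existing max_count candidates (fill_keywords_to_max existing max_count candidates)

-- ===== LEMMAS AND PROOFS =====

-- the two seed-set builders agree: if k = "" then strip k = "", so A's extra 'k != ""' test is redundant
theorem seen_fold_eq (l : List String) : ∀ (s : PySem.Set String),
    l.foldl (fun s k => if PySem.Str.strip k ≠ "" then PySem.Set.add s (PySem.Str.lower (PySem.Str.strip k)) else s) s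
      = l.foldl (fun s k => if k ≠ "" ∧ PySem.Str.strip k ≠ "" then PySem.Set.add s (PySem.Str.lower (PySem.Str.strip k)) else s) s := by
  induction l with
  | nil => intro s; rfl
  | cons k rest ih =>
    intro s
    simp only [List.foldl_cons]
    have hcond : (if PySem.Str.strip k ≠ "" then PySem.Set.add s (PySem.Str.lower (PySem.Str.strip k)) else s)
        = (if k ≠ "" ∧ PySem.Str.strip k ≠ "" then PySem.Set.add s (PySem.Str.lower (PySem.Str.strip k)) else s) := by
      by_cases hk : k = ""
      · subst hk
        have h0 : PySem.Str.strip "" = "" := by decide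
        simp [h0]
      · simp [hk]
    rw [hcond, ih]

theorem fkB_seen_eq (existing : List String) : fkB_seen existing = fkA_seen existing := by
  unfold fkA_seen fkB_seen
  exact seen_fold_eq existing PySem.Set.empty

-- A's guarded loop = append the first (max_count - |out|) elements of B's filtered list
theorem fkA_loop_eq (cs : List String) : ∀ (mc : Int) (seen : PySem.Set String) (out : List String),
    fkA_loop mc seen out cs =
      if mc ≤ (out.length : Int) then out
      else out ++ (fkB_filter seen cs).take (mc - out.length).toNat := by
  induction cs with
  | nil =>
    intro mc seen out
    simp only [fkA_loop, fkB_filter, List.take_nil, List.append_nil]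
    split <;> rfl
  | cons k rest ih =>
    intro mc seen out
    by_cases hlen : mc ≤ (out.length : Int)
    · simp [fkA_loop, hlen]
    · by_cases ht : PySem.Str.strip k = ""
      · simp only [fkA_loop, fkB_filter]
        simp [hlen, ht, ih mc seen out]
      · by_cases hm : PySem.Str.lower (PySem.Str.strip k) ∈ seen
        · simp only [fkA_loop, fkB_filter]
          simp [hlen, ht, hm, ih mc seen out]
        · -- accepted candidate
          have hc : PySem.Set.contains seen (PySem.Str.lower (PySem.Str.strip k)) = false := by
            simpa using hm
          simp only [fkA_loop, fkB_filter]
          simp only [hlen, ht, hc, ite_true, if_neg, not_false_iff, ne_eq, and_true,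
            Bool.false_eq_true, or_self]
          rw [ih]
          simp only [List.length_append, List.length_cons, List.length_nil, Nat.zero_add]
          push_cast
          have hpos : (mc - (out.length : Int)).toNat = (mc - (out.length : Int) - 1).toNat + 1 := by omega
          rw [hpos, List.take_succ_cons]
          by_cases h1 : mc ≤ (out.length : Int) + 1
          · have h0 : (mc - (out.length : Int) - 1).toNat = 0 := by omega
            rw [if_pos h1, h0]
            simp
          · rw [if_neg h1]
            have harith : mc - ((out.length : Int) + 1) = mc - (out.length : Int) - 1 := by ring
            rw [harith]
            simp [List.append_assoc]

theorem fill_keywords_to_max_eq (existing : List String) (max_count : Int) (candidates : List String) :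
    fill_keywords_to_max existing max_count candidates = fill_keywords_to_max_alt existing max_count candidates := by
  unfold fill_keywords_to_max fill_keywords_to_max_alt
  rw [fkA_loop_eq, fkB_seen_eq]
  by_cases h : max_count ≤ (existing.length : Int)
  · simp [h]
  · simp [h]

-- ===== VERDICT (by name: the statement is the Claim_ definition above) =====
theorem fill_keywords_to_max_spec : Claim_equal_fill_keywords_to_max := by
  intro existing max_count candidates _
  exact fill_keywords_to_max_eq existing max_count candidates
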